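-- pv_equiv track=rewrite | github.com/Hyeok95/Algorithms-Study | 유승아/Level 2/1주차/124나라의 숫자.py | solution
-- ===== SOURCE A (Python) =====
-- def solution(n):
--     answer = ''
--     if n <= 3:
--         return '124'[n-1]
--     else:
--         a, b = divmod(n-1, 3)
--         answer += solution(a) + '124'[b]
--
--     return answer
-- ===== SOURCE B (Python) =====
-- def solution(n):
--     digits = []
--     while n > 0:
--         n, r = divmod(n, 3)
--         if r == 0:
--             n -= 1
--             digits.append('4')
--         else:
--             digits.append('12'[r - 1])
--     return ''.join(reversed(digits))
-- ===== Notes on version B (the rewrite author's own statement) =====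
-- stated objective: alternative
-- what changed: A's recursion on divmod(n-1,3) with string concatenation is replaced by the classic iterative bijective-base-3 loop: divmod(n,3) with a zero-remainder borrow, collecting digits least-significant-first into a list and joining it reversed.
-- intended difference: On n in {-2,-1,0} A returns '1','2','4' by Python's negative-index wraparound of '124'[n-1], an accident of the base case; B returns '' there, the natural value since these numbers have no 124-representation. — e.g. on solution(0): A returns "4", B returns ""
import Mathlib
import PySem

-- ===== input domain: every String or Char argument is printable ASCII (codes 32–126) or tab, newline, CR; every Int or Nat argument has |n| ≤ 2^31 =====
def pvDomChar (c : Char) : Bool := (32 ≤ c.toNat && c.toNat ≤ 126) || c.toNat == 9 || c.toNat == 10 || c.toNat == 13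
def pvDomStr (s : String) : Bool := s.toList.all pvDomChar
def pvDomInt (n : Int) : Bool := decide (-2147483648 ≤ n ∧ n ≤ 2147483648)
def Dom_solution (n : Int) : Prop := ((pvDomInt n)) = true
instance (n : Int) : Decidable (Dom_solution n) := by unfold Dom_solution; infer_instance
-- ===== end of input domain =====

-- B replaces A's recursion on divmod(n-1,3) by the classic iterative bijective-base-3 loop
-- (divmod(n,3) with a borrow on remainder 0), collecting digits least-significant-first and
-- reversing at the end; objective: alternative. A's recursion strictly decreases n, so port A
-- carries a fuel counter (n.toNat + 1 is always enough) purely to make the same computation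
-- total; port B's loop likewise (n.toNat + 2 suffices).

-- ===== PORT A =====
-- Python's '124'[i] (exact via PySem.List.pyGet?; none = IndexError, excluded by Pre_solution)
def pyDigit (i : Int) : List Char :=
  ((PySem.List.pyGet? ['1', '2', '4'] i).map (fun c => [c])).getD []

def solutionChars (fuel : Nat) (n : Int) : List Char :=
  match fuel with
  | 0 => []
  | f + 1 =>
    if n ≤ 3 then pyDigit (n - 1)
    else
      let a := PySem.Int.floordiv (n - 1) 3
      let b := PySem.Int.mod (n - 1) 3
      solutionChars f a ++ pyDigit b

def solution (n : Int) : String := String.ofList (solutionChars (n.toNat + 1) n)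

-- ===== PORT B =====
-- the while-loop of Source B: digits are APPENDED least-significant-first ('12'[r-1] exact via pyGet?)
def solBDigits (fuel : Nat) (n : Int) (digits : List Char) : List Char :=
  match fuel with
  | 0 => []
  | f + 1 =>
    if n > 0 then
      let q := PySem.Int.floordiv n 3
      let r := PySem.Int.mod n 3
      if r = 0 then
        solBDigits f (q - 1) (digits ++ ['4'])
      else
        solBDigits f q (digits ++ ((PySem.List.pyGet? ['1', '2'] (r - 1)).map (fun c => [c])).getD [])
    else digits

-- ''.join(reversed(digits))
def solution_alt (n : Int) : String := String.ofList (solBDigits (n.toNat + 2) n []).reverse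

-- ===== PRECONDITION & SPEC =====
-- Pre_ excludes exactly n ≤ -3, where the Python A raises IndexError on '124'[n-1].
def Pre_solution (n : Int) : Prop := -2 ≤ n
instance (n : Int) : Decidable (Pre_solution n) := by unfold Pre_solution; infer_instance
def pvWitness_solution : Int := (5)

-- On n in {-2,-1,0} A returns '1','2','4' by Python's negative-index wraparound of '124'[n-1],
-- an accident of the base case; B returns '' there, the natural value since these numbers have
-- no 124-representation.
def D_solution (n : Int) : Prop := -2 ≤ n ∧ n ≤ 0
instance (n : Int) : Decidable (D_solution n) := by unfold D_solution; infer_instance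

def Spec_solution (n : Int) (out : String) : Prop := ¬ D_solution n → out = solution_alt n
instance (n : Int) (out : String) : Decidable (Spec_solution n out) := by unfold Spec_solution; infer_instance

def pvDiffWitness_solution : Int := (0)
def pvDiffWitnessOut_solution : String × String := ("4", "")

-- ===== CLAIM (what is proved, stated in full; the proofs are below) =====
def Claim_unchanged_solution : Prop := ∀ (n : Int), Dom_solution n → Pre_solution n → Spec_solution n (solution n)
def Claim_changed_solution : Prop := Dom_solution (pvDiffWitness_solution) ∧ Pre_solution (pvDiffWitness_solution) ∧ D_solution (pvDiffWitness_solution) ∧ solution (pvDiffWitness_solution) = pvDiffWitnessOut_solution.1 ∧ solution_alt (pvDiffWitness_solution) = pvDiffWitnessOut_solution.2 ∧ pvDiffWitnessOut_solution.1 ≠ pvDiffWitnessOut_solution.2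
def Claim_exact_solution : Prop := ∀ (n : Int), Dom_solution n → Pre_solution n → D_solution n → solution n ≠ solution_alt n

-- ===== LEMMAS AND PROOFS =====
theorem solBDigits_eq (f : Nat) (n : Int) (ds : List Char)
    (hn : 1 ≤ n) (hf : n.toNat + 1 < f) :
    solBDigits f n ds = ds ++ (solutionChars f n).reverse := by
  induction f generalizing n ds with
  | zero => omega
  | succ f ih =>
    rw [solBDigits, solutionChars]
    rw [if_pos (by omega : n > 0)]
    have hq := PySem.Int.floordiv_eq_ediv_of_pos (a := n) (by norm_num : (0:Int) < 3)
    have hr := PySem.Int.mod_eq_emod_of_pos (a := n) (by norm_num : (0:Int) < 3)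
    have hq' := PySem.Int.floordiv_eq_ediv_of_pos (a := n - 1) (by norm_num : (0:Int) < 3)
    have hr' := PySem.Int.mod_eq_emod_of_pos (a := n - 1) (by norm_num : (0:Int) < 3)
    by_cases h3 : n ≤ 3
    · rw [if_pos h3]
      by_cases h0 : PySem.Int.mod n 3 = 0
      · have h3' : n = 3 := by omega
        rw [if_pos h0]
        subst h3'
        have hq0 : PySem.Int.floordiv (3:Int) 3 - 1 = 0 := by omega
        rw [hq0]
        cases f with
        | zero => omega
        | succ f' => simp [solBDigits, pyDigit, PySem.List.pyGet?, PySem.List.pyIdx?]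
      · rw [if_neg h0]
        have h12 : n = 1 ∨ n = 2 := by omega
        have hq0 : PySem.Int.floordiv n 3 = 0 := by omega
        rw [hq0]
        cases f with
        | zero => omega
        | succ f' =>
          rcases h12 with h | h <;> subst h <;>
            simp [solBDigits, pyDigit, PySem.List.pyGet?, PySem.List.pyIdx?]
    · rw [if_neg h3]
      have hdvd : n ≥ 4 := by omega
      by_cases h0 : PySem.Int.mod n 3 = 0
      · rw [if_pos h0]
        have ha : PySem.Int.floordiv (n - 1) 3 = PySem.Int.floordiv n 3 - 1 := by omega
        have hb : PySem.Int.mod (n - 1) 3 = 2 := by omega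
        rw [ih (PySem.Int.floordiv n 3 - 1) _ (by omega) (by omega), ha, hb]
        simp [pyDigit, PySem.List.pyGet?, PySem.List.pyIdx?]
      · rw [if_neg h0]
        have ha : PySem.Int.floordiv (n - 1) 3 = PySem.Int.floordiv n 3 := by omega
        have hb : PySem.Int.mod (n - 1) 3 = PySem.Int.mod n 3 - 1 := by omega
        rw [ih (PySem.Int.floordiv n 3) _ (by omega) (by omega), ha, hb]
        have h12 : n % 3 = 1 ∨ n % 3 = 2 := by omega
        rcases h12 with h | h <;>
          simp [pyDigit, PySem.List.pyGet?, PySem.List.pyIdx?, h]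

-- ===== VERDICT (by name: the statements are the Claim_ definitions above) =====
theorem solutionChars_congr (f : Nat) (g : Nat) (n : Int) (hf : n.toNat < f) (hg : n.toNat < g) :
    solutionChars f n = solutionChars g n := by
  induction f generalizing g n with
  | zero => omega
  | succ f ih =>
    cases g with
    | zero => omega
    | succ g =>
      rw [solutionChars, solutionChars]
      by_cases h3 : n ≤ 3
      · rw [if_pos h3, if_pos h3]
      · rw [if_neg h3, if_neg h3]
        have hq' := PySem.Int.floordiv_eq_ediv_of_pos (a := n - 1) (by norm_num : (0:Int) < 3)
        simp only []
        rw [ih g (PySem.Int.floordiv (n - 1) 3) (by omega) (by omega)]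

theorem solution_spec : Claim_unchanged_solution := by
  intro n _ hP hD
  show _ = _
  unfold Pre_solution at hP; unfold D_solution at hD
  rw [solution, solution_alt, solBDigits_eq _ _ _ (by omega) (by omega)]
  rw [solutionChars_congr (n.toNat + 2) (n.toNat + 1) n (by omega) (by omega)]
  simp
theorem solution_changed : Claim_changed_solution := by unfold Claim_changed_solution; decide
theorem solution_tight : Claim_exact_solution := by
  intro n _ hP hD
  unfold Pre_solution at hP; unfold D_solution at hD
  obtain ⟨h1, h2⟩ := hD
  interval_cases n <;> decide
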